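-- pv_equiv track=rewrite | github.com/Vannico233/GraphScholar | src/build_graph.py | relation_priority
-- ===== SOURCE A (Python) =====
-- def relation_priority(relation_types: list[str]) -> str:
--     priority = [
--         "survey_of",
--         "evaluates",
--         "applies_to",
--         "shared_task",
--         "shared_dataset",
--         "shared_application",
--         "shared_topic",
--     ]
--     for relation in priority:
--         if relation in relation_types:
--             return relation
--     return relation_types[0] if relation_types else "related_to"
-- ===== SOURCE B (Python) =====
-- def relation_priority(relation_types: list[str]) -> str:
--     rank = {
--         "survey_of": 0,
--         "evaluates": 1,
--         "applies_to": 2,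
--         "shared_task": 3,
--         "shared_dataset": 4,
--         "shared_application": 5,
--         "shared_topic": 6,
--     }
--     best = None  # (rank, relation) with the smallest rank seen so far
--     for rel in relation_types:
--         r = rank.get(rel)
--         if r is not None and (best is None or r < best[0]):
--             best = (r, rel)
--     if best is not None:
--         return best[1]
--     return relation_types[0] if relation_types else "related_to"
-- ===== Notes on version B (the rewrite author's own statement) =====
-- stated objective: alternative
-- what changed: Instead of scanning the constant priority list and testing membership in the input for each entry, B builds a name-to-rank dict once and makes a single pass over relation_types tracking the element of minimal rank, with the same fallback.
import Mathlib
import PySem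

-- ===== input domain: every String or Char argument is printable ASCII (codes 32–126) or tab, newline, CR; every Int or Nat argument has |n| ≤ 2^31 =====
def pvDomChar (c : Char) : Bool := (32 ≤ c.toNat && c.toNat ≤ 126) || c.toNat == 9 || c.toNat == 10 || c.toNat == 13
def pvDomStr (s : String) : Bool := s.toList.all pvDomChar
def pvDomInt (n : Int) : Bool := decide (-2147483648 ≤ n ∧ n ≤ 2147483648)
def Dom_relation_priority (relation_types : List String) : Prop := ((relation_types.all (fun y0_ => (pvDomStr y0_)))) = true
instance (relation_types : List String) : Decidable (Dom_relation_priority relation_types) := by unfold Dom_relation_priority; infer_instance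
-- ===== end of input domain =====

-- B replaces A's scan of the constant priority list (a membership test in the input per
-- priority entry) by one pass over the input keeping the element of minimal rank in a
-- name→rank dict; objective: alternative (single pass over the input).

-- ===== PORT A =====
-- A's loop over the constant priority list: return the first priority name contained in
-- relation_types; the base case is A's final 'relation_types[0] if relation_types else "related_to"'.
def relation_priority_go (priority : List String) (relation_types : List String) : String :=
  match priority with
  | [] => match relation_types with
          | [] => "related_to"
          | x :: _ => x
  | p :: ps => if p ∈ relation_types then p else relation_priority_go ps relation_types

def relation_priority (relation_types : List String) : String :=
  relation_priority_go
    ["survey_of", "evaluates", "applies_to", "shared_task", "shared_dataset", "shared_application", "shared_topic"]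
    relation_types

-- ===== PORT B =====
-- B's name → rank table (Source B's dict literal)
def rank_relation_priority : PySem.Dict String Int :=
  PySem.Dict.ofList
    [("survey_of", 0), ("evaluates", 1), ("applies_to", 2), ("shared_task", 3),
     ("shared_dataset", 4), ("shared_application", 5), ("shared_topic", 6)]

-- body of B's for-loop: keep the (rank, relation) pair with the smallest rank seen so far
def step_relation_priority_alt (best : Option (Int × String)) (rel : String) :
    Option (Int × String) :=
  match rank_relation_priority.get? rel with
  | none => best
  | some r =>
    match best with
    | none => some (r, rel)
    | some b => if r < b.1 then some (r, rel) else best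

def relation_priority_alt (relation_types : List String) : String :=
  match relation_types.foldl step_relation_priority_alt none with
  | some b => b.2
  | none => match relation_types with
            | [] => "related_to"
            | x :: _ => x

-- ===== PRECONDITION & SPEC =====
def Spec_relation_priority (relation_types : List String) (out : String) : Prop := out = relation_priority_alt relation_types
instance (relation_types : List String) (out : String) : Decidable (Spec_relation_priority relation_types out) := by unfold Spec_relation_priority; infer_instance

-- ===== CLAIM (what is proved, stated in full; the proofs are below) =====
def Claim_equal_relation_priority : Prop := ∀ (relation_types : List String), Dom_relation_priority relation_types → Spec_relation_priority relation_types (relation_priority relation_types)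

-- ===== LEMMAS AND PROOFS =====

-- the priority name of a given rank
def nm (r : Int) : String :=
  if r = 0 then "survey_of" else if r = 1 then "evaluates" else if r = 2 then "applies_to" else if r = 3 then "shared_task" else if r = 4 then "shared_dataset" else if r = 5 then "shared_application" else if r = 6 then "shared_topic" else ""

lemma nm_0 : nm 0 = "survey_of" := by decide
lemma nm_1 : nm 1 = "evaluates" := by decide
lemma nm_2 : nm 2 = "applies_to" := by decide
lemma nm_3 : nm 3 = "shared_task" := by decide
lemma nm_4 : nm 4 = "shared_dataset" := by decide
lemma nm_5 : nm 5 = "shared_application" := by decide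
lemma nm_6 : nm 6 = "shared_topic" := by decide

-- B's rank dict, computed: first-match lookup over the seven concrete entries
lemma rk_eq (s : String) :
    rank_relation_priority.get? s = (if s = "survey_of" then some 0 else if s = "evaluates" then some 1 else if s = "applies_to" then some 2 else if s = "shared_task" then some 3 else if s = "shared_dataset" then some 4 else if s = "shared_application" then some 5 else if s = "shared_topic" then some 6 else none) := by
  rcases eq_or_ne s "survey_of" with h0 | h0
  · subst h0; decide
  rcases eq_or_ne s "evaluates" with h1 | h1
  · subst h1; decide
  rcases eq_or_ne s "applies_to" with h2 | h2
  · subst h2; decide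
  rcases eq_or_ne s "shared_task" with h3 | h3
  · subst h3; decide
  rcases eq_or_ne s "shared_dataset" with h4 | h4
  · subst h4; decide
  rcases eq_or_ne s "shared_application" with h5 | h5
  · subst h5; decide
  rcases eq_or_ne s "shared_topic" with h6 | h6
  · subst h6; decide
  have b0 : ("survey_of" == s) = false := by simp; exact Ne.symm h0
  have b1 : ("evaluates" == s) = false := by simp; exact Ne.symm h1
  have b2 : ("applies_to" == s) = false := by simp; exact Ne.symm h2
  have b3 : ("shared_task" == s) = false := by simp; exact Ne.symm h3
  have b4 : ("shared_dataset" == s) = false := by simp; exact Ne.symm h4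
  have b5 : ("shared_application" == s) = false := by simp; exact Ne.symm h5
  have b6 : ("shared_topic" == s) = false := by simp; exact Ne.symm h6
  simp [rank_relation_priority, PySem.Dict.ofList, PySem.Dict.update, PySem.Dict.get?, PySem.Dict.insert,
    PySem.Dict.empty, List.find?, b0, b1, b2, b3, b4, b5, b6, h0, h1, h2, h3, h4, h5, h6]

lemma rk_some (s : String) (r : Int) (h : rank_relation_priority.get? s = some r) :
    0 ≤ r ∧ r < 7 ∧ s = nm r := by
  rw [rk_eq] at h
  split_ifs at h with h1 h2 h3 h4 h5 h6 h7
  · injection h with h'; subst h'; subst h1; exact ⟨by norm_num, by norm_num, by decide⟩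
  · injection h with h'; subst h'; subst h2; exact ⟨by norm_num, by norm_num, by decide⟩
  · injection h with h'; subst h'; subst h3; exact ⟨by norm_num, by norm_num, by decide⟩
  · injection h with h'; subst h'; subst h4; exact ⟨by norm_num, by norm_num, by decide⟩
  · injection h with h'; subst h'; subst h5; exact ⟨by norm_num, by norm_num, by decide⟩
  · injection h with h'; subst h'; subst h6; exact ⟨by norm_num, by norm_num, by decide⟩
  · injection h with h'; subst h'; subst h7; exact ⟨by norm_num, by norm_num, by decide⟩

lemma rk_nm (j : Int) (h0 : 0 ≤ j) (h7 : j < 7) :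
    rank_relation_priority.get? (nm j) = some j := by
  interval_cases j <;> decide

-- once the minimal rank j is in the accumulator, the fold never changes it
lemma keep_min (j : Int) :
    ∀ (l : List String), (∀ k : Int, 0 ≤ k → k < j → nm k ∉ l) →
      List.foldl step_relation_priority_alt (some (j, nm j)) l = some (j, nm j) := by
  intro l
  induction l with
  | nil => intro _; rfl
  | cons x xs ih =>
    intro hlow
    have hstep : step_relation_priority_alt (some (j, nm j)) x = some (j, nm j) := by
      unfold step_relation_priority_alt
      cases hx : rank_relation_priority.get? x with
      | none => rfl
      | some r =>
        obtain ⟨hr0, _, hxr⟩ := rk_some x r hx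
        have hrj : ¬ r < j := by
          intro hlt
          exact hlow r hr0 hlt (by rw [← hxr]; exact List.mem_cons_self)
        simp [hrj]
    rw [List.foldl_cons, hstep]
    exact ih (fun k hk0 hk => fun hmem => hlow k hk0 hk (List.mem_cons_of_mem _ hmem))

-- if nm j is present in l and no smaller-ranked name is, the fold yields (j, nm j)
lemma find_min (j : Int) (hj0 : 0 ≤ j) (hj7 : j < 7) :
    ∀ (l : List String) (b : Option (Int × String)),
      (b = none ∨ b = some (j, nm j) ∨ ∃ r s, b = some (r, s) ∧ j < r) →
      nm j ∈ l → (∀ k : Int, 0 ≤ k → k < j → nm k ∉ l) →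
      List.foldl step_relation_priority_alt b l = some (j, nm j) := by
  intro l
  induction l with
  | nil => intro b _ hmem _; exact absurd hmem (List.not_mem_nil)
  | cons x xs ih =>
    intro b hinv hmem hlow
    have hlow' : ∀ k : Int, 0 ≤ k → k < j → nm k ∉ xs :=
      fun k hk0 hk hmemk => hlow k hk0 hk (List.mem_cons_of_mem _ hmemk)
    rw [List.foldl_cons]
    cases hx : rank_relation_priority.get? x with
    | none =>
      have hxne : x ≠ nm j := by
        intro he; rw [he, rk_nm j hj0 hj7] at hx; simp at hx
      have hmem' : nm j ∈ xs := by
        rcases List.mem_cons.mp hmem with h | h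
        · exact absurd h.symm hxne
        · exact h
      have hb : step_relation_priority_alt b x = b := by
        simp only [step_relation_priority_alt, hx]
      rw [hb]; exact ih b hinv hmem' hlow'
    | some r =>
      obtain ⟨hr0, hr7, hxr⟩ := rk_some x r hx
      have hjr : j ≤ r := by
        by_contra hlt
        exact hlow r hr0 (by omega) (by rw [← hxr]; exact List.mem_cons_self)
      by_cases hxj : x = nm j
      · -- the head is the minimal name: accumulator becomes (j, nm j) and stays
        have hrj : r = j := by
          rw [hxj, rk_nm j hj0 hj7] at hx
          exact (Option.some.inj hx).symm
        subst hrj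
        have hb : step_relation_priority_alt b x = some (r, nm r) := by
          rcases hinv with hb | hb | ⟨r', s', hb, hgt⟩ <;> subst hb <;>
            simp only [step_relation_priority_alt, hx]
          · rw [hxj]
          · simp
          · simp [hgt, hxj]
        rw [hb]
        exact keep_min r xs hlow'
      · -- the head is some other ranked name: its rank exceeds j
        have hjr' : j < r := by
          rcases lt_or_eq_of_le hjr with h | h
          · exact h
          · exact absurd (by rw [hxr, ← h]) hxj
        have hmem' : nm j ∈ xs := by
          rcases List.mem_cons.mp hmem with h | h
          · exact absurd h.symm hxj
          · exact h
        have hinv' : step_relation_priority_alt b x = none ∨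
            step_relation_priority_alt b x = some (j, nm j) ∨
            ∃ r' s', step_relation_priority_alt b x = some (r', s') ∧ j < r' := by
          rcases hinv with hb | hb | ⟨r', s', hb, hgt⟩ <;> subst hb <;>
            simp only [step_relation_priority_alt, hx]
          · exact Or.inr (Or.inr ⟨r, x, rfl, hjr'⟩)
          · rw [if_neg (by omega : ¬ r < j)]
            exact Or.inr (Or.inl rfl)
          · by_cases hc : r < r'
            · rw [if_pos hc]; exact Or.inr (Or.inr ⟨r, x, rfl, hjr'⟩)
            · rw [if_neg hc]; exact Or.inr (Or.inr ⟨r', s', rfl, hgt⟩)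
        exact ih _ hinv' hmem' hlow'

-- if no priority name occurs in l, the fold stays at none
lemma fold_none :
    ∀ (l : List String), (∀ k : Int, 0 ≤ k → k < 7 → nm k ∉ l) →
      List.foldl step_relation_priority_alt none l = none := by
  intro l
  induction l with
  | nil => intro _; rfl
  | cons x xs ih =>
    intro hlow
    have hx : rank_relation_priority.get? x = none := by
      cases hx : rank_relation_priority.get? x with
      | none => rfl
      | some r =>
        obtain ⟨hr0, hr7, hxr⟩ := rk_some x r hx
        exact absurd (by rw [← hxr]; exact List.mem_cons_self) (hlow r hr0 hr7)
    have hb : step_relation_priority_alt none x = none := by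
      simp only [step_relation_priority_alt, hx]
    rw [List.foldl_cons, hb]
    exact ih (fun k hk0 hk hmemk => hlow k hk0 hk (List.mem_cons_of_mem _ hmemk))

-- ===== VERDICT (by name: the statement is the Claim_ definition above) =====
theorem relation_priority_spec : Claim_equal_relation_priority := by
  intro relation_types _
  unfold Spec_relation_priority
  by_cases c0 : "survey_of" ∈ relation_types
  · have hlow : ∀ k : Int, 0 ≤ k → k < (0 : Int) → nm k ∉ relation_types := by
      intro k hk0 hk
      omega
    have hmem : nm (0 : Int) ∈ relation_types := by rw [nm_0]; exact c0
    have hf := find_min 0 (by norm_num) (by norm_num) relation_types none (Or.inl rfl) hmem hlow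
    simp [relation_priority, relation_priority_go, relation_priority_alt, hf, nm_0, c0]
  by_cases c1 : "evaluates" ∈ relation_types
  · have hlow : ∀ k : Int, 0 ≤ k → k < (1 : Int) → nm k ∉ relation_types := by
      intro k hk0 hk
      interval_cases k
      · rw [nm_0]; exact c0
    have hmem : nm (1 : Int) ∈ relation_types := by rw [nm_1]; exact c1
    have hf := find_min 1 (by norm_num) (by norm_num) relation_types none (Or.inl rfl) hmem hlow
    simp [relation_priority, relation_priority_go, relation_priority_alt, hf, nm_1, c0, c1]
  by_cases c2 : "applies_to" ∈ relation_types
  · have hlow : ∀ k : Int, 0 ≤ k → k < (2 : Int) → nm k ∉ relation_types := by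
      intro k hk0 hk
      interval_cases k
      · rw [nm_0]; exact c0
      · rw [nm_1]; exact c1
    have hmem : nm (2 : Int) ∈ relation_types := by rw [nm_2]; exact c2
    have hf := find_min 2 (by norm_num) (by norm_num) relation_types none (Or.inl rfl) hmem hlow
    simp [relation_priority, relation_priority_go, relation_priority_alt, hf, nm_2, c0, c1, c2]
  by_cases c3 : "shared_task" ∈ relation_types
  · have hlow : ∀ k : Int, 0 ≤ k → k < (3 : Int) → nm k ∉ relation_types := by
      intro k hk0 hk
      interval_cases k
      · rw [nm_0]; exact c0
      · rw [nm_1]; exact c1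
      · rw [nm_2]; exact c2
    have hmem : nm (3 : Int) ∈ relation_types := by rw [nm_3]; exact c3
    have hf := find_min 3 (by norm_num) (by norm_num) relation_types none (Or.inl rfl) hmem hlow
    simp [relation_priority, relation_priority_go, relation_priority_alt, hf, nm_3, c0, c1, c2, c3]
  by_cases c4 : "shared_dataset" ∈ relation_types
  · have hlow : ∀ k : Int, 0 ≤ k → k < (4 : Int) → nm k ∉ relation_types := by
      intro k hk0 hk
      interval_cases k
      · rw [nm_0]; exact c0
      · rw [nm_1]; exact c1
      · rw [nm_2]; exact c2
      · rw [nm_3]; exact c3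
    have hmem : nm (4 : Int) ∈ relation_types := by rw [nm_4]; exact c4
    have hf := find_min 4 (by norm_num) (by norm_num) relation_types none (Or.inl rfl) hmem hlow
    simp [relation_priority, relation_priority_go, relation_priority_alt, hf, nm_4, c0, c1, c2, c3, c4]
  by_cases c5 : "shared_application" ∈ relation_types
  · have hlow : ∀ k : Int, 0 ≤ k → k < (5 : Int) → nm k ∉ relation_types := by
      intro k hk0 hk
      interval_cases k
      · rw [nm_0]; exact c0
      · rw [nm_1]; exact c1
      · rw [nm_2]; exact c2
      · rw [nm_3]; exact c3
      · rw [nm_4]; exact c4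
    have hmem : nm (5 : Int) ∈ relation_types := by rw [nm_5]; exact c5
    have hf := find_min 5 (by norm_num) (by norm_num) relation_types none (Or.inl rfl) hmem hlow
    simp [relation_priority, relation_priority_go, relation_priority_alt, hf, nm_5, c0, c1, c2, c3, c4, c5]
  by_cases c6 : "shared_topic" ∈ relation_types
  · have hlow : ∀ k : Int, 0 ≤ k → k < (6 : Int) → nm k ∉ relation_types := by
      intro k hk0 hk
      interval_cases k
      · rw [nm_0]; exact c0
      · rw [nm_1]; exact c1
      · rw [nm_2]; exact c2
      · rw [nm_3]; exact c3
      · rw [nm_4]; exact c4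
      · rw [nm_5]; exact c5
    have hmem : nm (6 : Int) ∈ relation_types := by rw [nm_6]; exact c6
    have hf := find_min 6 (by norm_num) (by norm_num) relation_types none (Or.inl rfl) hmem hlow
    simp [relation_priority, relation_priority_go, relation_priority_alt, hf, nm_6, c0, c1, c2, c3, c4, c5, c6]
  have hlow : ∀ k : Int, 0 ≤ k → k < (7 : Int) → nm k ∉ relation_types := by
    intro k hk0 hk
    interval_cases k
    · rw [nm_0]; exact c0
    · rw [nm_1]; exact c1
    · rw [nm_2]; exact c2
    · rw [nm_3]; exact c3
    · rw [nm_4]; exact c4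
    · rw [nm_5]; exact c5
    · rw [nm_6]; exact c6
  have hf := fold_none relation_types hlow
  cases relation_types with
  | nil => simp [relation_priority, relation_priority_go, relation_priority_alt]
  | cons x xs =>
    simp [relation_priority, relation_priority_go, relation_priority_alt, hf, c0, c1, c2, c3, c4, c5, c6]
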